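-- pv_equiv track=rewrite | github.com/sujitpursuit/sttmtest_web | parsers/excel_format_adapter.py | find_test_sheet
-- ===== SOURCE A (Python) =====
-- from typing import Dict, List, Any, Optional
--
-- def find_test_sheet(sheet_names: List[str]) -> str:
--     """Find the main sheet containing test cases in QTEST format"""
--
--     # Skip obvious non-test sheets
--     skip_patterns = ['cover', 'summary', 'index', 'readme', 'instruction']
--
--     # QTEST-specific patterns (in priority order)
--     test_sheet_patterns = [
--         'vendor', 'inbound', 'test', 'testcase', 'test case', 'tests',
--         'tc', 'qtest', 'md-', 'main', 'data'
--     ]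
--
--     # Filter out cover/summary sheets first
--     candidate_sheets = []
--     for sheet in sheet_names:
--         sheet_lower = sheet.lower()
--         is_skip = any(skip in sheet_lower for skip in skip_patterns)
--         if not is_skip:
--             candidate_sheets.append(sheet)
--
--     if not candidate_sheets:
--         candidate_sheets = sheet_names
--
--     # First try exact matches on candidates
--     for pattern in test_sheet_patterns:
--         for sheet in candidate_sheets:
--             if pattern.lower() == sheet.lower():
--                 return sheet
--
--     # Then try partial matches on candidates
--     for pattern in test_sheet_patterns:
--         for sheet in candidate_sheets:
--             if pattern.lower() in sheet.lower():
--                 return sheet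
--
--     # Default to first non-cover sheet, or first sheet
--     return candidate_sheets[0] if candidate_sheets else sheet_names[0]
-- ===== SOURCE B (Python) =====
-- def find_test_sheet(sheet_names):
--     """Find the main sheet containing test cases in QTEST format"""
--     skip_patterns = ['cover', 'summary', 'index', 'readme', 'instruction']
--     test_sheet_patterns = [
--         'vendor', 'inbound', 'test', 'testcase', 'test case', 'tests',
--         'tc', 'qtest', 'md-', 'main', 'data'
--     ]
--
--     candidate_sheets = [s for s in sheet_names
--                         if not any(skip in s.lower() for skip in skip_patterns)]
--     if not candidate_sheets:
--         candidate_sheets = sheet_names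
--
--     # Single pass: per sheet, a priority key (0=exact beats 1=partial, then
--     # lowest matching pattern index); keep the first sheet with the least key.
--     def key(sheet):
--         low = sheet.lower()
--         exact = next((i for i, p in enumerate(test_sheet_patterns) if p == low), None)
--         if exact is not None:
--             return (0, exact)
--         partial = next((i for i, p in enumerate(test_sheet_patterns) if p in low), None)
--         if partial is not None:
--             return (1, partial)
--         return None
--
--     best = None
--     for sheet in candidate_sheets:
--         k = key(sheet)
--         if k is not None and (best is None or k < best[0]):
--             best = (k, sheet)
--
--     return best[1] if best is not None else candidate_sheets[0]
-- ===== Notes on version B (the rewrite author's own statement) =====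
-- stated objective: alternative
-- what changed: The two nested pattern-major early-return scans (exact, then partial) are replaced by a single pass over the candidate sheets that computes a lexicographic priority key (exact-flag, lowest matching pattern index) per sheet and keeps the first sheet with the least key.
import Mathlib
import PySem

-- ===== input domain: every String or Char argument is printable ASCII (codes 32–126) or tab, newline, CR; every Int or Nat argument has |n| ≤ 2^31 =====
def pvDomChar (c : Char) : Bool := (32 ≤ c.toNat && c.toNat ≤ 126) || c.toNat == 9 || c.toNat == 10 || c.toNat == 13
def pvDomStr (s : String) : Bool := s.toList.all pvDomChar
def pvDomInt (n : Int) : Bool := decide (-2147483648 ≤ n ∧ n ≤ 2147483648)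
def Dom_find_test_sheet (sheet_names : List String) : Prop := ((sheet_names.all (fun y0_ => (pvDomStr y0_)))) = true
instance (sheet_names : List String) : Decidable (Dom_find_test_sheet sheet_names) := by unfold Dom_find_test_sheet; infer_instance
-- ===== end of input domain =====

-- B replaces A's two nested pattern-major early-return scans by one pass over the
-- candidate sheets keeping the first sheet with the least (exact-flag, pattern-index) key.

-- shared module constants (identical literals in both Pythons)
def pvSkipPatterns : List String :=
  ["cover", "summary", "index", "readme", "instruction"]
def pvTestPatterns : List String :=
  ["vendor", "inbound", "test", "testcase", "test case", "tests",
   "tc", "qtest", "md-", "main", "data"]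

-- candidate filtering, identical code in A and B
def pvCandidates (sheet_names : List String) : List String :=
  let c := sheet_names.filter
    (fun s => !(pvSkipPatterns.any (fun k => PySem.Str.isIn k (PySem.Str.lower s))))
  if c.isEmpty then sheet_names else c

-- ===== PORT A =====
-- 'for pattern: for sheet: if cond: return sheet' — the nested early-return scan
def pvScan (m : String → String → Bool) (ps : List String) (c : List String) : Option String :=
  match ps with
  | [] => none
  | p :: rest =>
    match c.find? (fun s => m p s) with
    | some t => some t
    | none => pvScan m rest c

def find_test_sheet (sheet_names : List String) : String :=
  let cand := pvCandidates sheet_names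
  match pvScan (fun p s => PySem.Str.lower p == PySem.Str.lower s) pvTestPatterns cand with
  | some t => t
  | none =>
    match pvScan (fun p s => PySem.Str.isIn (PySem.Str.lower p) (PySem.Str.lower s)) pvTestPatterns cand with
    | some t => t
    | none =>
      match cand with
      | t :: _ => t
      | [] => ""   -- Python raises IndexError here (sheet_names = []); excluded by Pre_

-- ===== PORT B =====
-- next((i for i,p in enumerate(ps) if f(p)), None)
def pvFirstIdx (f : String → Bool) : List String → Option Nat
  | [] => none
  | p :: rest => if f p then some 0 else (pvFirstIdx f rest).map (· + 1)

-- key(sheet): (0, exact-index) / (1, partial-index) / None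
def pvKey (s : String) : Option (Nat × Nat) :=
  let low := PySem.Str.lower s
  match pvFirstIdx (fun p => p == low) pvTestPatterns with
  | some e => some (0, e)
  | none =>
    match pvFirstIdx (fun p => PySem.Str.isIn p low) pvTestPatterns with
    | some pi => some (1, pi)
    | none => none

-- Python tuple '<' on the 2-tuples key returns
def pvLexLt (k j : Nat × Nat) : Bool :=
  decide (k.1 < j.1 ∨ (k.1 = j.1 ∧ k.2 < j.2))

-- the single accumulator loop of B
def pvBestFold (best : Option ((Nat × Nat) × String)) : List String → Option ((Nat × Nat) × String)
  | [] => best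
  | s :: rest =>
    let best' :=
      match pvKey s, best with
      | none, b => b
      | some k, none => some (k, s)
      | some k, some (j, t) => if pvLexLt k j then some (k, s) else some (j, t)
    pvBestFold best' rest

def find_test_sheet_alt (sheet_names : List String) : String :=
  let cand := pvCandidates sheet_names
  match pvBestFold none cand with
  | some (_, t) => t
  | none =>
    match cand with
    | t :: _ => t
    | [] => ""   -- Python raises IndexError here (sheet_names = []); excluded by Pre_

-- ===== PRECONDITION & SPEC =====
-- Pre_ excludes only the empty list, on which A (and B alike) raises IndexError.
def Pre_find_test_sheet (sheet_names : List String) : Prop := sheet_names ≠ []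
instance (sheet_names : List String) : Decidable (Pre_find_test_sheet sheet_names) := by
  unfold Pre_find_test_sheet; infer_instance

def pvWitness_find_test_sheet : List String := ["Cover", "Test Cases", "Data"]

def Spec_find_test_sheet (sheet_names : List String) (out : String) : Prop :=
  out = find_test_sheet_alt sheet_names
instance (sheet_names : List String) (out : String) : Decidable (Spec_find_test_sheet sheet_names out) := by
  unfold Spec_find_test_sheet; infer_instance

-- ===== CLAIM (what is proved, stated in full; the proofs are below) =====
def Claim_equal_find_test_sheet : Prop :=
  ∀ (sheet_names : List String), Dom_find_test_sheet sheet_names →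
    Pre_find_test_sheet sheet_names →
    Spec_find_test_sheet sheet_names (find_test_sheet sheet_names)

-- ===== LEMMAS AND PROOFS =====

-- generic first-argmin (earliest element attaining the least key; none-keys skipped)
def pvArgmin {β : Type} (lt : β → β → Bool) (f : String → Option β) : List String → Option (β × String)
  | [] => none
  | s :: r =>
    match f s, pvArgmin lt f r with
    | none, b => b
    | some k, none => some (k, s)
    | some k, some (j, t) => if lt j k then some (j, t) else some (k, s)

def pvNatLt (a b : Nat) : Bool := decide (a < b)

def pvEIdx (s : String) : Option Nat :=
  pvFirstIdx (fun p => p == PySem.Str.lower s) pvTestPatterns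
def pvPIdx (s : String) : Option Nat :=
  pvFirstIdx (fun p => PySem.Str.isIn p (PySem.Str.lower s)) pvTestPatterns

lemma pvArgmin_const_none {β : Type} (lt : β → β → Bool) (c : List String) :
    pvArgmin lt (fun _ => (none : Option β)) c = none := by
  induction c with
  | nil => rfl
  | cons s r ih => simp [pvArgmin, ih]

-- shifting the key by one: first-match on (P-prefixed) keys
lemma pvArgmin_shift (P : String → Bool) (g : String → Option Nat) (c : List String) :
    pvArgmin pvNatLt (fun s => if P s then some 0 else (g s).map (· + 1)) c
      = match c.find? P with
        | some t => some (0, t)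
        | none => (pvArgmin pvNatLt g c).map (fun kt => (kt.1 + 1, kt.2)) := by
  induction c with
  | nil => rfl
  | cons s r ih =>
    by_cases hP : P s
    · simp only [pvArgmin, hP, if_pos, List.find?, ih]
      rcases h : r.find? P with _ | t
      · rcases hg : pvArgmin pvNatLt g r with _ | ⟨k, u⟩ <;>
          simp [h, hg, hP, pvNatLt]
      · simp [h, hP, pvNatLt]
    · simp only [pvArgmin, hP, if_neg, List.find?]
      rcases h : r.find? P with _ | t
      · simp only [h, ih]
        rcases hgs : g s with _ | k <;>
          rcases hg : pvArgmin pvNatLt g r with _ | ⟨j, u⟩ <;>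
            simp [pvArgmin, hgs, hg, pvNatLt] <;> split_ifs <;> simp_all <;> omega
      · rcases hgs : g s with _ | k <;>
          simp [h, ih, pvNatLt]

-- A's nested scan is the earliest sheet with the least first-matching-pattern index
lemma pvScan_eq_argmin (m : String → String → Bool) (ps c : List String) :
    pvScan m ps c
      = (pvArgmin pvNatLt (fun s => pvFirstIdx (fun p => m p s) ps) c).map (·.2) := by
  induction ps with
  | nil =>
    simp [pvScan, pvFirstIdx, pvArgmin_const_none]
  | cons p rest ih =>
    have hshift := pvArgmin_shift (fun s => m p s)
      (fun s => pvFirstIdx (fun q => m q s) rest) c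
    simp only [pvScan, pvFirstIdx] at *
    rw [hshift]
    rcases h : c.find? (fun s => m p s) with _ | t
    · simp only [h, ih]
      rcases hg : pvArgmin pvNatLt (fun s => pvFirstIdx (fun q => m q s) rest) c with _ | ⟨k, u⟩ <;>
        simp [hg]
    · simp [h]

-- B's key combines the two scans' keys: exact (flag 0) outranks partial (flag 1)
lemma pvArgmin_key_combine (c : List String) :
    pvArgmin pvLexLt pvKey c
      = match pvArgmin pvNatLt pvEIdx c with
        | some (e, t) => some ((0, e), t)
        | none => (pvArgmin pvNatLt pvPIdx c).map (fun kt => ((1, kt.1), kt.2)) := by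
  induction c with
  | nil => rfl
  | cons s r ih =>
    have hkey : pvKey s = match pvEIdx s with
      | some e => some (0, e)
      | none => (pvPIdx s).map (fun pi => (1, pi)) := by
      simp only [pvKey, pvEIdx, pvPIdx]
      rcases h : pvFirstIdx (fun p => p == PySem.Str.lower s) pvTestPatterns with _ | e <;>
        rcases h2 : pvFirstIdx (fun p => PySem.Str.isIn p (PySem.Str.lower s)) pvTestPatterns with _ | pi <;>
          simp [h, h2]
    simp only [pvArgmin, hkey, ih]
    rcases he : pvEIdx s with _ | e <;>
      rcases hE : pvArgmin pvNatLt pvEIdx r with _ | ⟨e', t⟩ <;>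
        rcases hp : pvPIdx s with _ | pi <;>
          rcases hP : pvArgmin pvNatLt pvPIdx r with _ | ⟨p', u⟩ <;>
            simp [pvLexLt, pvNatLt] <;> split_ifs <;> simp_all <;> omega

-- B's loop computes the first-argmin (induction generalizing the accumulator)
lemma pvBestFold_eq_argmin_aux (c : List String) (b : Option ((Nat × Nat) × String)) :
    pvBestFold b c
      = match b, pvArgmin pvLexLt pvKey c with
        | none, m => m
        | some a, none => some a
        | some (j, t), some (k, u) => if pvLexLt k j then some (k, u) else some (j, t) := by
  induction c generalizing b with
  | nil => rcases b with _ | ⟨j, t⟩ <;> rfl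
  | cons s r ih =>
    simp only [pvBestFold, pvArgmin]
    rcases hk : pvKey s with _ | k
    · rcases b with _ | ⟨j, t⟩ <;> simp [ih]
    · rcases b with _ | ⟨j, t⟩
      · rcases hR : pvArgmin pvLexLt pvKey r with _ | ⟨m, u⟩ <;>
          simp [ih, hR]
      · obtain ⟨k1, k2⟩ := k; obtain ⟨j1, j2⟩ := j
        rcases hR : pvArgmin pvLexLt pvKey r with _ | ⟨⟨m1, m2⟩, u⟩
        · by_cases h1 : pvLexLt (k1, k2) (j1, j2) <;>
            simp [ih, hR, h1]
        · by_cases h1 : pvLexLt (k1, k2) (j1, j2) <;>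
            by_cases h2 : pvLexLt (m1, m2) (k1, k2) <;>
              by_cases h3 : pvLexLt (m1, m2) (j1, j2) <;>
                simp [ih, hR, h1, h2, h3] <;>
                  (exfalso
                   simp only [pvLexLt, decide_eq_true_eq, Bool.not_eq_true,
                     decide_eq_false_iff_not] at h1 h2 h3
                   omega)

lemma pvBestFold_eq_argmin (c : List String) :
    pvBestFold none c = pvArgmin pvLexLt pvKey c := by
  rw [pvBestFold_eq_argmin_aux]

-- the literal patterns are already lowercase
lemma pvPatterns_lower : ∀ p ∈ pvTestPatterns, PySem.Str.lower p = p := by decide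

lemma pvFirstIdx_congr (f g : String → Bool) (ps : List String)
    (h : ∀ p ∈ ps, f p = g p) : pvFirstIdx f ps = pvFirstIdx g ps := by
  induction ps with
  | nil => rfl
  | cons p rest ih =>
    simp only [pvFirstIdx, h p (by simp), ih (fun q hq => h q (by simp [hq]))]

-- A's per-sheet key functions are B's
lemma pvEIdx_eq (s : String) :
    pvFirstIdx (fun p => PySem.Str.lower p == PySem.Str.lower s) pvTestPatterns = pvEIdx s := by
  exact pvFirstIdx_congr _ _ _ (fun p hp => by rw [pvPatterns_lower p hp])

lemma pvPIdx_eq (s : String) :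
    pvFirstIdx (fun p => PySem.Str.isIn (PySem.Str.lower p) (PySem.Str.lower s)) pvTestPatterns
      = pvPIdx s := by
  exact pvFirstIdx_congr _ _ _ (fun p hp => by rw [pvPatterns_lower p hp])

-- ===== VERDICT (by name: the statement is the Claim_ definition above) =====
theorem find_test_sheet_spec : Claim_equal_find_test_sheet := by
  intro names _ _
  unfold Spec_find_test_sheet find_test_sheet find_test_sheet_alt
  simp only [pvScan_eq_argmin, pvBestFold_eq_argmin, pvArgmin_key_combine]
  have h1 : (fun s => pvFirstIdx (fun p => PySem.Str.lower p == PySem.Str.lower s) pvTestPatterns) = pvEIdx := by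
    funext s; exact pvEIdx_eq s
  have h2 : (fun s => pvFirstIdx (fun p => PySem.Str.isIn (PySem.Str.lower p) (PySem.Str.lower s)) pvTestPatterns) = pvPIdx := by
    funext s; exact pvPIdx_eq s
  rw [h1, h2]
  rcases hE : pvArgmin pvNatLt pvEIdx (pvCandidates names) with _ | ⟨e, t⟩
  · rcases hP : pvArgmin pvNatLt pvPIdx (pvCandidates names) with _ | ⟨p, u⟩ <;> simp [hE, hP]
  · simp [hE]
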